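-- pv_equiv track=rewrite | github.com/ghost60420/iconic_portal | crm/services/lead_enrichment.py | pick_contact_pages
-- ===== SOURCE A (Python) =====
-- def pick_contact_pages(links):
--     contact = ""
--     about = ""
--     for link in links:
--         lower = link.lower()
--         if not contact and ("contact" in lower or "support" in lower):
--             contact = link
--         if not about and ("about" in lower or "story" in lower):
--             about = link
--     return contact, about
-- ===== SOURCE B (Python) =====
-- def pick_contact_pages(links):
--     contact = next((l for l in links
--                     if "contact" in l.lower() or "support" in l.lower()), "")
--     about = next((l for l in links
--                   if "about" in l.lower() or "story" in l.lower()), "")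
--     return contact, about
-- ===== Notes on version B (the rewrite author's own statement) =====
-- stated objective: idiomatic
-- what changed: One interleaved loop with first-wins guards is replaced by two independent first-match queries via next() with a '' default.
import Mathlib
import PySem

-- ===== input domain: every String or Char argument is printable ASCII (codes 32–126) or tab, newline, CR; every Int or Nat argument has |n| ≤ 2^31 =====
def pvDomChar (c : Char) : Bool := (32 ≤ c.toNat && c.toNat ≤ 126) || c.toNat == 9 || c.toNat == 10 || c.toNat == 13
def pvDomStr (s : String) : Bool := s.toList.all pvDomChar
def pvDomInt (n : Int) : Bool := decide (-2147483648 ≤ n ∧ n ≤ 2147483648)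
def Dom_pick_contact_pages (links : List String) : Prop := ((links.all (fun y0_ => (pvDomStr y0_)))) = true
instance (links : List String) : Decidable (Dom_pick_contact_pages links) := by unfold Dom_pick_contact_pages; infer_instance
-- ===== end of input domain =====

-- B replaces A's single interleaved first-wins loop by two independent first-match scans (idiomatic next()-style queries).


-- ===== PORT A =====
def pick_contact_pages (links : List String) : String × String :=
  links.foldl
    (fun st link =>
      let lower := PySem.Str.lower link
      let contact :=
        if st.1 == "" && (PySem.Str.isIn "contact" lower || PySem.Str.isIn "support" lower)
        then link else st.1
      let about :=
        if st.2 == "" && (PySem.Str.isIn "about" lower || PySem.Str.isIn "story" lower)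
        then link else st.2
      (contact, about))
    ("", "")

-- ===== PORT B =====
def pcB (l : String) : Bool :=
  PySem.Str.isIn "contact" (PySem.Str.lower l) || PySem.Str.isIn "support" (PySem.Str.lower l)

def paB (l : String) : Bool :=
  PySem.Str.isIn "about" (PySem.Str.lower l) || PySem.Str.isIn "story" (PySem.Str.lower l)

def pick_contact_pages_alt (links : List String) : String × String :=
  ((links.find? pcB).getD "", (links.find? paB).getD "")

-- ===== PRECONDITION & SPEC =====
def Spec_pick_contact_pages (links : List String) (out : String × String) : Prop := out = pick_contact_pages_alt links
instance (links : List String) (out : String × String) : Decidable (Spec_pick_contact_pages links out) := by unfold Spec_pick_contact_pages; infer_instance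

-- ===== CLAIM (what is proved, stated in full; the proofs are below) =====
def Claim_equal_pick_contact_pages : Prop := ∀ (links : List String), Dom_pick_contact_pages links → Spec_pick_contact_pages links (pick_contact_pages links)

-- ===== LEMMAS AND PROOFS =====

-- a link matching either predicate contains a nonempty substring, hence is nonempty
lemma pcB_ne_empty {l : String} (h : pcB l = true) : l ≠ "" := by
  intro he; subst he; revert h; decide

lemma paB_ne_empty {l : String} (h : paB l = true) : l ≠ "" := by
  intro he; subst he; revert h; decide

-- A's fold, started from an arbitrary accumulator: each component is either the
-- already-found value, or the first match further on (defaulting to "").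
lemma fold_eq (links : List String) : ∀ (c a : String),
    links.foldl
      (fun st link =>
        let lower := PySem.Str.lower link
        let contact :=
          if st.1 == "" && (PySem.Str.isIn "contact" lower || PySem.Str.isIn "support" lower)
          then link else st.1
        let about :=
          if st.2 == "" && (PySem.Str.isIn "about" lower || PySem.Str.isIn "story" lower)
          then link else st.2
        (contact, about))
      (c, a)
    = ((if c = "" then (links.find? pcB).getD "" else c),
       (if a = "" then (links.find? paB).getD "" else a)) := by
  induction links with
  | nil =>
    intro c a
    simp only [List.foldl_nil, List.find?_nil, Option.getD_none]
    simp only [Prod.mk.injEq]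
    constructor <;> (split <;> simp_all)
  | cons l t ih =>
    intro c a
    simp only [List.foldl_cons, List.find?_cons]
    rw [ih]
    have hpc : (PySem.Str.isIn "contact" (PySem.Str.lower l)
        || PySem.Str.isIn "support" (PySem.Str.lower l)) = pcB l := rfl
    have hpa : (PySem.Str.isIn "about" (PySem.Str.lower l)
        || PySem.Str.isIn "story" (PySem.Str.lower l)) = paB l := rfl
    simp only [hpc, hpa, Prod.mk.injEq]
    constructor
    · by_cases hc : c = ""
      · subst hc
        cases hl : pcB l with
        | true => simp [pcB_ne_empty hl]
        | false => simp
      · simp [hc]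
    · by_cases ha : a = ""
      · subst ha
        cases hl : paB l with
        | true => simp [paB_ne_empty hl]
        | false => simp
      · simp [ha]

-- ===== VERDICT (by name: the statement is the Claim_ definition above) =====
theorem pick_contact_pages_spec : Claim_equal_pick_contact_pages := by
  intro links _
  show pick_contact_pages links = pick_contact_pages_alt links
  unfold pick_contact_pages pick_contact_pages_alt
  rw [fold_eq]
  simp
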